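-- pv_equiv track=rewrite | github.com/intel/inference-model-manager | management/management_api/utils/kubernetes_resources.py | transform_quota
-- ===== SOURCE A (Python) =====
-- def transform_quota(quota):
--     transformed = {}
--     for k, v in quota.items():
--         keys = k.split('.')
--         if len(keys) == 1:
--             continue
--         transformed.setdefault(keys[0], {})[keys[1]] = v
--     return transformed
-- ===== SOURCE B (Python) =====
-- def transform_quota(quota):
--     multi = [(ks, v) for k, v in quota.items() for ks in [k.split('.')] if len(ks) != 1]
--     tops = list(dict.fromkeys(ks[0] for ks, _ in multi))
--     return {t: {ks[1]: v for ks, v in multi if ks[0] == t} for t in tops}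
-- ===== Notes on version B (the rewrite author's own statement) =====
-- stated objective: alternative
-- what changed: Instead of one pass that accumulates nested dicts via setdefault, B first collects the distinct top-level prefixes in first-occurrence order and then builds each inner dict by a comprehension rescanning the pre-split items, grouping by prefix.
import Mathlib
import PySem

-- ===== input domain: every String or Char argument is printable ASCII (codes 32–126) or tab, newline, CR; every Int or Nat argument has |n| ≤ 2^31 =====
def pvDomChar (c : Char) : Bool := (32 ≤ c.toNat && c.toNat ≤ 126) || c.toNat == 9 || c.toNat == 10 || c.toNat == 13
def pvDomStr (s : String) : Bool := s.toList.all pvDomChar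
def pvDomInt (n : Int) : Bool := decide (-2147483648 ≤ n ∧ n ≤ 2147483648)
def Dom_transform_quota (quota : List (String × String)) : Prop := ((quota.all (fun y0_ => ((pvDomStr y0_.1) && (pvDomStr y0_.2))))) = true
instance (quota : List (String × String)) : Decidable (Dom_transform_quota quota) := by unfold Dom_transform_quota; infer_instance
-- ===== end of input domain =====

-- B groups by distinct top-level prefixes first and rescans per prefix, instead of A's
-- single accumulating pass with setdefault; same return value, a different decomposition.

-- ===== PORT A =====
-- k.split('.') with the nonempty separator ".": split? is always `some` here, getD [] never fires.
def pySplitDot (s : String) : List String := (PySem.Str.split? s ".").getD []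

def transform_quota (quota : List (String × String)) : List (String × List (String × String)) :=
  let transformed : PySem.Dict String (PySem.Dict String String) :=
    quota.foldl (fun transformed kv =>
      let keys := pySplitDot kv.1
      if keys.length = 1 then transformed
      else transformed.modify (PySem.List.pyGetD keys 0 "") PySem.Dict.empty
             (fun inner => inner.insert (PySem.List.pyGetD keys 1 "") kv.2)) PySem.Dict.empty
  transformed.items.map (fun p => (p.1, p.2.items))

-- ===== PORT B =====
def transform_quota_alt (quota : List (String × String)) : List (String × List (String × String)) :=
  let multi : List (List String × String) :=
    (quota.map (fun kv => (pySplitDot kv.1, kv.2))).filter (fun p => !(p.1.length == 1))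
  let tops : List String := PySem.List.dedup (multi.map (fun p => PySem.List.pyGetD p.1 0 ""))
  tops.map (fun t =>
    (t, ((multi.filter (fun p => PySem.List.pyGetD p.1 0 "" == t)).foldl
          (fun d p => d.insert (PySem.List.pyGetD p.1 1 "") p.2) PySem.Dict.empty).items))

-- ===== PRECONDITION & SPEC =====
def Spec_transform_quota (quota : List (String × String)) (out : List (String × List (String × String))) : Prop := out = transform_quota_alt quota
instance (quota : List (String × String)) (out : List (String × List (String × String))) : Decidable (Spec_transform_quota quota out) := by unfold Spec_transform_quota; infer_instance

-- ===== CLAIM (what is proved, stated in full; the proofs are below) =====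
def Claim_equal_transform_quota : Prop := ∀ (quota : List (String × String)), Dom_transform_quota quota → Spec_transform_quota quota (transform_quota quota)

-- ===== LEMMAS AND PROOFS =====

theorem find?_beq_self_of_mem {K : Type} [BEq K] [LawfulBEq K] (l : List K) (x : K) (h : x ∈ l) : l.find? (· == x) = some x := by
  induction l with
  | nil => simp at h
  | cons y ys ih =>
    rw [List.find?_cons]
    by_cases he : y = x
    · subst he; simp
    · simp only [List.mem_cons] at h
      have h' : x ∈ ys := h.resolve_left (fun hh => he hh.symm)
      rw [show (y == x) = false from beq_eq_false_iff_ne.mpr he]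
      exact ih h'

theorem any_beq_self {K : Type} [BEq K] [LawfulBEq K] (l : List K) (x : K) : l.any (· == x) = decide (x ∈ l) := by
  induction l with
  | nil => simp
  | cons y ys ih =>
    by_cases he : y = x
    · subst he; simp
    · simp [he, ih, beq_eq_false_iff_ne.mpr (fun h => he h.symm)]

theorem dedup_append_singleton {α : Type} [BEq α] [LawfulBEq α] (xs : List α) (x : α) :
    PySem.List.dedup (xs ++ [x]) = if x ∈ PySem.List.dedup xs then PySem.List.dedup xs else PySem.List.dedup xs ++ [x] := by
  simp only [PySem.List.dedup_eq_ofList, PySem.Set.ofList_eq_foldl, List.foldl_append, List.foldl_cons, List.foldl_nil]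
  rw [PySem.Set.add]
  by_cases h : x ∈ List.foldl PySem.Set.add [] xs
  · rw [if_pos ((PySem.Set.contains_iff _ x).2 h), if_pos h]
  · rw [if_neg (fun hc => h ((PySem.Set.contains_iff _ x).1 hc)), if_neg h]

theorem group_items {α K K' V : Type} [BEq K] [LawfulBEq K] [BEq K'] (k0 : α → K) (k1 : α → K') (v : α → V) (m : List α) :
    (m.foldl (fun d p => PySem.Dict.modify d (k0 p) PySem.Dict.empty (fun dd => dd.insert (k1 p) (v p))) PySem.Dict.empty).items
      = (PySem.List.dedup (m.map k0)).map (fun t =>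
          (t, (m.filter (fun p => k0 p == t)).foldl (fun d p => d.insert (k1 p) (v p)) PySem.Dict.empty)) := by
  induction m using List.reverseRecOn with
  | nil => rfl
  | append_singleton m a ih =>
    rw [List.foldl_append, List.foldl_cons, List.foldl_nil]
    rw [List.map_append, List.map_singleton, dedup_append_singleton]
    set T := PySem.List.dedup (m.map k0) with hT
    set G := m.foldl (fun d p => PySem.Dict.modify d (k0 p) PySem.Dict.empty (fun dd => dd.insert (k1 p) (v p))) PySem.Dict.empty with hG
    have hcont : G.contains (k0 a) = decide ((k0 a) ∈ T) := by
      rw [PySem.Dict.contains, ih, List.any_map]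
      exact any_beq_self T (k0 a)
    have hfilt : ∀ t, (m ++ [a]).filter (fun p => k0 p == t) = m.filter (fun p => k0 p == t) ++ if k0 a == t then [a] else [] := by
      intro t; rw [List.filter_append]; simp [List.filter_singleton]
    by_cases hmem : (k0 a) ∈ T
    · -- existing top-level key: modify replaces the entry in place
      have hget : G.getD (k0 a) PySem.Dict.empty = (m.filter (fun p => k0 p == (k0 a))).foldl (fun d p => d.insert (k1 p) (v p)) PySem.Dict.empty := by
        rw [PySem.Dict.getD, PySem.Dict.get?, ih, List.find?_map]
        rw [show List.find? ((fun p => p.1 == (k0 a)) ∘ (fun t => (t, (m.filter (fun p => k0 p == t)).foldl (fun d p => d.insert (k1 p) (v p)) PySem.Dict.empty))) T = T.find? (· == (k0 a)) from rfl]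
        rw [find?_beq_self_of_mem T (k0 a) hmem]
        rfl
      rw [if_pos hmem]
      rw [PySem.Dict.modify, PySem.Dict.items_insert_of_contains _ _ (by rw [hcont]; simpa), ih]
      rw [hget, List.map_map]
      apply List.map_congr_left
      intro t htT
      by_cases he : t = k0 a
      · subst he; simp [Function.comp, hfilt]
      · simp [Function.comp, hfilt, beq_eq_false_iff_ne.mpr he, beq_eq_false_iff_ne.mpr (fun h => he h.symm)]
    · -- fresh top-level key: modify appends a new entry
      have hnotin : (k0 a) ∉ m.map k0 := by
        rw [← PySem.List.mem_dedup (m.map k0) (k0 a)]; exact hmem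
      have hget : G.getD (k0 a) PySem.Dict.empty = PySem.Dict.empty := by
        rw [PySem.Dict.getD, PySem.Dict.get?, ih, List.find?_map]
        rw [show List.find? ((fun p => p.1 == (k0 a)) ∘ (fun t => (t, (m.filter (fun p => k0 p == t)).foldl (fun d p => d.insert (k1 p) (v p)) PySem.Dict.empty))) T = T.find? (· == (k0 a)) from rfl]
        rw [List.find?_eq_none.2 ?_]
        · rfl
        · intro t htT hbe
          exact hmem ((eq_of_beq hbe) ▸ htT)
      rw [if_neg hmem]
      rw [PySem.Dict.modify, PySem.Dict.items_insert_of_not_contains _ _ (by rw [hcont]; simpa), ih]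
      rw [hget, List.map_append, List.map_singleton]
      congr 1
      · apply List.map_congr_left
        intro t htT
        have hne : k0 a ≠ t := fun he => hmem (he ▸ htT)
        simp [hfilt, beq_eq_false_iff_ne.mpr hne]
      · have hfilt0 : m.filter (fun p => k0 p == (k0 a)) = [] := by
          rw [List.filter_eq_nil_iff]
          intro p hp hbe
          exact hnotin (List.mem_map.2 ⟨p, hp, eq_of_beq hbe⟩)
        simp [hfilt, hfilt0]

-- ===== VERDICT (by name: the statement is the Claim_ definition above) =====
theorem transform_quota_spec : Claim_equal_transform_quota := by
  intro quota _
  unfold Spec_transform_quota transform_quota transform_quota_alt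
  have hstep :
      (quota.foldl (fun (transformed : PySem.Dict String (PySem.Dict String String)) kv =>
          let keys := pySplitDot kv.1
          if keys.length = 1 then transformed
          else transformed.modify (PySem.List.pyGetD keys 0 "") PySem.Dict.empty
                 (fun inner => inner.insert (PySem.List.pyGetD keys 1 "") kv.2)) PySem.Dict.empty)
        = (((quota.map (fun kv => (pySplitDot kv.1, kv.2))).filter (fun p => !(p.1.length == 1))).foldl
            (fun d p => PySem.Dict.modify d (PySem.List.pyGetD p.1 0 "") PySem.Dict.empty
              (fun dd => dd.insert (PySem.List.pyGetD p.1 1 "") p.2)) PySem.Dict.empty) := by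
    rw [List.foldl_filter, List.foldl_map]
    apply PySem.List.foldl_congr_mem
    intro acc x _
    by_cases h : (pySplitDot x.1).length = 1 <;> simp [h]
  have hgi := group_items (fun (p : List String × String) => PySem.List.pyGetD p.1 0 "")
      (fun p => PySem.List.pyGetD p.1 1 "") (fun p => p.2)
      ((quota.map (fun kv => (pySplitDot kv.1, kv.2))).filter (fun p => !(p.1.length == 1)))
  dsimp only
  rw [hstep, hgi, List.map_map]
  rfl
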